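-- pv_equiv track=rewrite | github.com/mwasifanwar/LegalMind | core/summary_generator.py | _extract_key_sections
-- ===== SOURCE A (Python) =====
-- from typing import List, Dict, Any
--
-- def _extract_key_sections(text: str) -> Dict[str, str]:
--     sections = {}
--
--     section_keywords = {
--         'parties': ['party', 'between', 'agreement between'],
--         'term': ['term', 'duration', 'effective date', 'expiration'],
--         'payment': ['payment', 'fee', 'compensation', 'price', 'consideration'],
--         'confidentiality': ['confidential', 'proprietary', 'non-disclosure'],
--         'warranties': ['warrant', 'represent', 'covenant'],
--         'liability': ['liability', 'indemnif', 'hold harmless', 'damages'],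
--         'termination': ['terminat', 'breach', 'default', 'cure'],
--         'governing_law': ['governing law', 'jurisdiction', 'venue', 'dispute']
--     }
--
--     text_lower = text.lower()
--     lines = text.split('\n')
--
--     for section_name, keywords in section_keywords.items():
--         section_text = ""
--         in_section = False
--
--         for line in lines:
--             line_lower = line.lower()
--
--             if any(keyword in line_lower for keyword in keywords):
--                 in_section = True
--
--             if in_section:
--                 section_text += line + "\n"
--
--                 if len(section_text) > 1000:
--                     break
--
--         if section_text:
--             sections[section_name] = section_text
--
--     return sections
-- ===== SOURCE B (Python) =====
-- def _step(keywords, line, line_lower, state):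
--     in_section, acc, done = state
--     if done:
--         return state
--     if any(k in line_lower for k in keywords):
--         in_section = True
--     if in_section:
--         acc = acc + line + "\n"
--         done = len(acc) > 1000
--     return (in_section, acc, done)
--
--
-- def _extract_key_sections(text):
--     section_keywords = [
--         ('parties', ['party', 'between', 'agreement between']),
--         ('term', ['term', 'duration', 'effective date', 'expiration']),
--         ('payment', ['payment', 'fee', 'compensation', 'price', 'consideration']),
--         ('confidentiality', ['confidential', 'proprietary', 'non-disclosure']),
--         ('warranties', ['warrant', 'represent', 'covenant']),
--         ('liability', ['liability', 'indemnif', 'hold harmless', 'damages']),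
--         ('termination', ['terminat', 'breach', 'default', 'cure']),
--         ('governing_law', ['governing law', 'jurisdiction', 'venue', 'dispute']),
--     ]
--     states = [(False, "", False) for _ in section_keywords]
--     for line in text.split('\n'):
--         line_lower = line.lower()
--         states = [_step(kws, line, line_lower, st)
--                   for (_, kws), st in zip(section_keywords, states)]
--     return {name: acc
--             for (name, _), (_, acc, _) in zip(section_keywords, states) if acc}
-- ===== Notes on version B (the rewrite author's own statement) =====
-- stated objective: alternative
-- what changed: Replaced A's section-major nested scan (for each of the 8 sections, rescan and re-lowercase every line until its text exceeds 1000 chars) by a single line-major pass that lowercases each line once and updates a per-section (in_section, text, done) state, then emits non-empty sections in declaration order.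
import Mathlib
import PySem

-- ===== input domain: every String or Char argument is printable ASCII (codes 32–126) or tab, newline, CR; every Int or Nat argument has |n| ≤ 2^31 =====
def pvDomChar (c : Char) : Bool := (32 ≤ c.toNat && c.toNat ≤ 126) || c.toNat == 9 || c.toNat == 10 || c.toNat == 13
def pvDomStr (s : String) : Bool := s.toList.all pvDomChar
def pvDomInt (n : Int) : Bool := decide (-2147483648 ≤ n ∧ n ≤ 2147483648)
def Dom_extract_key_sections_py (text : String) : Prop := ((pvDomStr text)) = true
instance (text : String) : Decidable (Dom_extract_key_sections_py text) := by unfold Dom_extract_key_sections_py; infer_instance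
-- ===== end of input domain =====

-- B replaces A's section-major nested scan (each line visited and lowercased once per section)
-- by a single line-major pass maintaining per-section (in_section, text, done) states; objective: alternative decomposition.

-- the section_keywords table, shared verbatim by both sources
def pvSK : List (String × List String) :=
  [("parties", ["party", "between", "agreement between"]),
   ("term", ["term", "duration", "effective date", "expiration"]),
   ("payment", ["payment", "fee", "compensation", "price", "consideration"]),
   ("confidentiality", ["confidential", "proprietary", "non-disclosure"]),
   ("warranties", ["warrant", "represent", "covenant"]),
   ("liability", ["liability", "indemnif", "hold harmless", "damages"]),
   ("termination", ["terminat", "breach", "default", "cure"]),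
   ("governing_law", ["governing law", "jurisdiction", "venue", "dispute"])]

-- ===== PORT A =====
-- A's inner 'for line in lines: … break' loop for one section
def pvInnerA (kws : List String) : List String → Bool → String → String
  | [], _, acc => acc
  | line :: rest, inSec, acc =>
    let ll := PySem.Str.lower line
    let inSec := if kws.any (fun k => PySem.Str.isIn k ll) then true else inSec
    if inSec then
      let acc := acc ++ line ++ "\n"
      if PySem.Str.len acc > 1000 then acc else pvInnerA kws rest inSec acc
    else pvInnerA kws rest inSec acc

def extract_key_sections_py (text : String) : List (String × String) :=
  let _text_lower := PySem.Str.lower text   -- computed and unused, as in A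
  let lines := (PySem.Str.split? text "\n").getD []   -- sep is the literal "\n" ≠ "", so split? is always `some`
  pvSK.foldl (fun sections sec =>
    let section_text := pvInnerA sec.2 lines false ""
    if section_text ≠ "" then sections ++ [(sec.1, section_text)] else sections) []

-- ===== PORT B =====
-- Source B's _step: update one section's (in_section, acc, done) state for one line
def pvStepB (line ll : String) (e : (String × List String) × (Bool × String × Bool)) :
    (String × List String) × (Bool × String × Bool) :=
  if e.2.2.2 then e
  else
    let inS := if e.1.2.any (fun k => PySem.Str.isIn k ll) then true else e.2.1
    if inS then
      let acc := e.2.2.1 ++ line ++ "\n"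
      (e.1, (inS, acc, decide (PySem.Str.len acc > 1000)))
    else (e.1, (inS, e.2.2.1, false))

def extract_key_sections_py_alt (text : String) : List (String × String) :=
  let lines := (PySem.Str.split? text "\n").getD []
  let init := pvSK.map (fun s => (s, (false, "", false)))
  let states := lines.foldl (fun sts line =>
    let ll := PySem.Str.lower line
    sts.map (pvStepB line ll)) init
  states.filterMap (fun e => if e.2.2.1 ≠ "" then some (e.1.1, e.2.2.1) else none)

-- ===== PRECONDITION & SPEC =====
def Spec_extract_key_sections_py (text : String) (out : List (String × String)) : Prop := out = extract_key_sections_py_alt text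
instance (text : String) (out : List (String × String)) : Decidable (Spec_extract_key_sections_py text out) := by unfold Spec_extract_key_sections_py; infer_instance

-- ===== CLAIM (what is proved, stated in full; the proofs are below) =====
def Claim_equal_extract_key_sections_py : Prop := ∀ (text : String), Dom_extract_key_sections_py text → Spec_extract_key_sections_py text (extract_key_sections_py text)

-- ===== LEMMAS AND PROOFS =====

-- one application of pvStepB to a not-yet-done state, written out
theorem pv_step_unfold (line ll : String) (sec : String × List String) (inSec : Bool) (acc : String) :
    pvStepB line ll (sec, (inSec, acc, false))
      = (if (if sec.2.any (fun k => PySem.Str.isIn k ll) then true else inSec)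
         then (sec, ((if sec.2.any (fun k => PySem.Str.isIn k ll) then true else inSec),
                     acc ++ line ++ "\n", decide (PySem.Str.len (acc ++ line ++ "\n") > 1000)))
         else (sec, ((if sec.2.any (fun k => PySem.Str.isIn k ll) then true else inSec), acc, false))) := rfl

-- folding a per-element map over the lines = per-element fold of the lines
theorem pv_fold_map (lines : List String) (init : List ((String × List String) × (Bool × String × Bool))) :
    lines.foldl (fun sts line => sts.map (pvStepB line (PySem.Str.lower line))) init
      = init.map (fun e => lines.foldl (fun x l => pvStepB l (PySem.Str.lower l) x) e) := by
  induction lines generalizing init with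
  | nil => simp
  | cons l rest ih =>
    rw [List.foldl_cons, ih, List.map_map]
    rfl

-- once done, pvStepB is the identity for all remaining lines
theorem pv_done_absorb (lines : List String) (e : (String × List String) × (Bool × String × Bool))
    (h : e.2.2.2 = true) :
    lines.foldl (fun x l => pvStepB l (PySem.Str.lower l) x) e = e := by
  induction lines with
  | nil => rfl
  | cons l rest ih => simpa [pvStepB, h] using ih

-- pvStepB never changes the (name, keywords) component of a state
theorem pv_fold_fst (lines : List String) (e : (String × List String) × (Bool × String × Bool)) :
    (lines.foldl (fun x l => pvStepB l (PySem.Str.lower l) x) e).1 = e.1 := by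
  induction lines generalizing e with
  | nil => rfl
  | cons l rest ih =>
    rw [List.foldl_cons, ih]
    unfold pvStepB
    split
    · rfl
    · dsimp only
      split
      · rfl
      · split <;> rfl

-- A's inner loop equals the accumulated text of B's per-section fold (done initially false)
theorem pv_inner_eq (lines : List String) (sec : String × List String) (inSec : Bool) (acc : String) :
    pvInnerA sec.2 lines inSec acc
      = (lines.foldl (fun x l => pvStepB l (PySem.Str.lower l) x) (sec, (inSec, acc, false))).2.2.1 := by
  induction lines generalizing inSec acc with
  | nil => rfl
  | cons line rest ih =>
    rw [List.foldl_cons, pv_step_unfold]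
    show (let ll := PySem.Str.lower line
          let inSec := if sec.2.any (fun k => PySem.Str.isIn k ll) then true else inSec
          if inSec then
            let acc := acc ++ line ++ "\n"
            if PySem.Str.len acc > 1000 then acc else pvInnerA sec.2 rest inSec acc
          else pvInnerA sec.2 rest inSec acc) = _
    simp only []
    cases hb2 : (if sec.2.any (fun k => PySem.Str.isIn k (PySem.Str.lower line)) then true else inSec) with
    | true =>
      rw [if_pos rfl, if_pos rfl]
      by_cases hlen : PySem.Str.len (acc ++ line ++ "\n") > 1000
      · rw [if_pos hlen, decide_eq_true hlen,
          pv_done_absorb rest (sec, (true, acc ++ line ++ "\n", true)) rfl]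
      · rw [if_neg hlen, decide_eq_false hlen]
        exact ih true (acc ++ line ++ "\n")
    | false =>
      simp only [Bool.false_eq_true, if_false]
      exact ih false acc

-- ===== VERDICT (by name: the statement is the Claim_ definition above) =====
theorem extract_key_sections_py_spec : Claim_equal_extract_key_sections_py := by
  intro text _
  show extract_key_sections_py text = extract_key_sections_py_alt text
  simp only [extract_key_sections_py, extract_key_sections_py_alt]
  rw [pv_fold_map, List.map_map, List.filterMap_map]
  generalize (PySem.Str.split? text "\n").getD [] = lines
  induction pvSK using List.reverseRecOn with
  | nil => rfl
  | append_singleton l s ih =>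
    rw [List.foldl_append, List.filterMap_append, ih]
    simp only [List.foldl_cons, List.foldl_nil, List.filterMap_cons, List.filterMap_nil,
      Function.comp_apply, pv_inner_eq lines s false ""]
    by_cases h : (lines.foldl (fun x l => pvStepB l (PySem.Str.lower l) x) (s, (false, "", false))).2.2.1 ≠ ""
    · simp [h, pv_fold_fst lines (s, (false, "", false))]
    · simp only [ne_eq, not_not] at h
      simp [h]
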